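-- pv_equiv track=rewrite | github.com/birhantprkc/token-optimizer | skills/token-optimizer/scripts/detectors/websearch_routing.py | _count_web_calls
-- ===== SOURCE A (Python) =====
-- _WEB_TOOLS = frozenset({
--     "WebSearch", "WebFetch",
--     "mcp__tavily__tavily_search", "mcp__tavily__tavily_extract",
--     "mcp__tavily__tavily_crawl", "mcp__tavily__tavily_research",
--     "mcp__exa__web_search_exa", "mcp__exa__crawling_exa",
--     "mcp__brightdata__search_engine", "mcp__brightdata__scrape_as_markdown",
-- })
--
-- _WEB_MCP_PREFIXES = ("mcp__tavily__", "mcp__exa__", "mcp__brightdata__",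
--                      "mcp__claude_ai_BrightData__", "mcp__perplexity")
--
-- def _count_web_calls(tool_calls):
--     """Count web search/fetch tool calls from a tool_calls dict."""
--     count = sum(tool_calls.get(t, 0) for t in _WEB_TOOLS)
--     for name, n in tool_calls.items():
--         if name in _WEB_TOOLS:
--             continue
--         if any(name.startswith(p) for p in _WEB_MCP_PREFIXES):
--             count += n
--     return count
-- ===== SOURCE B (Python) =====
-- _WEB_MCP_PREFIXES = ("mcp__tavily__", "mcp__exa__", "mcp__brightdata__",
--                      "mcp__claude_ai_BrightData__", "mcp__perplexity")
--
-- def _count_web_calls(tool_calls):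
--     """Count web search/fetch tool calls from a tool_calls dict.
--
--     The fixed tool set is gone: every mcp tool in it already matches one of
--     the prefixes, so only WebSearch/WebFetch need direct lookups."""
--     total = tool_calls.get("WebSearch", 0) + tool_calls.get("WebFetch", 0)
--     for name, n in tool_calls.items():
--         if name.startswith(_WEB_MCP_PREFIXES):
--             total += n
--     return total
-- ===== Notes on version B (the rewrite author's own statement) =====
-- stated objective: simpler
-- what changed: B eliminates the _WEB_TOOLS set entirely: since every mcp tool in that set already matches one of _WEB_MCP_PREFIXES, B just adds direct lookups of 'WebSearch' and 'WebFetch' to a single pass summing the entries whose name matches a prefix (str.startswith with a tuple), instead of A's sum over the ten-element set plus a continue-based second loop.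
import Mathlib
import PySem

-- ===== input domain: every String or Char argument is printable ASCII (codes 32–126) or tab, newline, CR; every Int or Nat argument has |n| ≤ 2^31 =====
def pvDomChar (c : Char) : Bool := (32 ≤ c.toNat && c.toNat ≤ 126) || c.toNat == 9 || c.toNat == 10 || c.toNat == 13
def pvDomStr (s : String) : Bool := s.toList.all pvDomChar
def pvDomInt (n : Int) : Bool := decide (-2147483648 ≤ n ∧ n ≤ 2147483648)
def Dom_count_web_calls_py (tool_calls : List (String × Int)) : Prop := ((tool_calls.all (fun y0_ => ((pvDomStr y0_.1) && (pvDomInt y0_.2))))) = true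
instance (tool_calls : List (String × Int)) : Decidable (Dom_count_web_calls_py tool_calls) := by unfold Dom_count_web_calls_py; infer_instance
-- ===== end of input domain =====

-- B drops the _WEB_TOOLS set entirely (every mcp tool in it already matches one of the
-- prefixes): two direct lookups for WebSearch/WebFetch plus one prefix-sum pass; objective: simpler.

-- module constant _WEB_TOOLS (a frozenset of strings; membership only, order irrelevant) — used by A only
def pvWebTools : List String :=
  ["WebSearch", "WebFetch",
   "mcp__tavily__tavily_search", "mcp__tavily__tavily_extract",
   "mcp__tavily__tavily_crawl", "mcp__tavily__tavily_research",
   "mcp__exa__web_search_exa", "mcp__exa__crawling_exa",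
   "mcp__brightdata__search_engine", "mcp__brightdata__scrape_as_markdown"]

-- module constant _WEB_MCP_PREFIXES
def pvWebPrefixes : List String :=
  ["mcp__tavily__", "mcp__exa__", "mcp__brightdata__",
   "mcp__claude_ai_BrightData__", "mcp__perplexity"]

-- ===== PORT A =====
def count_web_calls_py (tool_calls : List (String × Int)) : Int :=
  let d := PySem.Dict.ofList tool_calls
  let count := (pvWebTools.map (fun t => d.getD t 0)).sum
  d.items.foldl (fun count p =>
    if pvWebTools.contains p.1 then count
    else if pvWebPrefixes.any (fun pre => PySem.Str.startswith p.1 pre) then count + p.2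
    else count) count

-- ===== PORT B =====
def count_web_calls_py_alt (tool_calls : List (String × Int)) : Int :=
  let d := PySem.Dict.ofList tool_calls
  let total := d.getD "WebSearch" 0 + d.getD "WebFetch" 0
  d.items.foldl (fun total p =>
    if pvWebPrefixes.any (fun pre => PySem.Str.startswith p.1 pre) then total + p.2
    else total) total

-- ===== PRECONDITION & SPEC =====
def Spec_count_web_calls_py (tool_calls : List (String × Int)) (out : Int) : Prop := out = count_web_calls_py_alt tool_calls
instance (tool_calls : List (String × Int)) (out : Int) : Decidable (Spec_count_web_calls_py tool_calls out) := by unfold Spec_count_web_calls_py; infer_instance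

-- ===== CLAIM (what is proved, stated in full; the proofs are below) =====
def Claim_equal_count_web_calls_py : Prop := ∀ (tool_calls : List (String × Int)), Dom_count_web_calls_py tool_calls → Spec_count_web_calls_py tool_calls (count_web_calls_py tool_calls)

-- ===== LEMMAS AND PROOFS =====

-- summing an if-rewritten function over a duplicate-free list
lemma sum_map_if_eq (ws : List String) (hw : ws.Nodup) (k : String) (v : Int) (g : String → Int) :
    (ws.map (fun t => if (k == t) = true then v else g t)).sum
      = (ws.map g).sum + (if ws.contains k then v - g k else 0) := by
  induction ws with
  | nil => simp
  | cons t ws ih =>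
    rcases List.nodup_cons.mp hw with ⟨ht, hw'⟩
    by_cases hk : k = t
    · subst hk
      have hmap : (ws.map (fun t => if (k == t) = true then v else g t)).sum = (ws.map g).sum := by
        have h : ∀ t ∈ ws, (if (k == t) = true then v else g t) = g t := by
          intro t htm
          have : k ≠ t := fun h => ht (h ▸ htm)
          simp [this]
        rw [List.map_congr_left h]
      have h1 : (if (k == k) = true then v else g k) = v := by simp
      have hc : (k :: ws).contains k = true := by simp
      rw [List.map_cons, List.sum_cons, h1, hmap, List.map_cons, List.sum_cons, if_pos hc]
      ring
    · have hne : (k == t) = false := by simp [hk]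
      rw [List.map_cons, List.sum_cons, List.map_cons, List.sum_cons, hne, ih hw']
      simp only [Bool.false_eq_true, if_false, List.contains_cons, hne, Bool.false_or]
      split_ifs <;> ring

-- a sum of getD-lookups over a duplicate-free key list equals the per-item sum of its members (dict keys nodup)
lemma sum_getD_eq (ws : List String) (hw : ws.Nodup) :
    ∀ (its : List (String × Int)), (its.map Prod.fst).Nodup →
      (ws.map (fun t => (PySem.Dict.mk its).getD t 0)).sum
        = (its.map (fun p => if ws.contains p.1 then p.2 else 0)).sum := by
  intro its
  induction its with
  | nil =>
    intro _
    simp [PySem.Dict.getD, PySem.Dict.get?]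
  | cons p rest ih =>
    intro hnd
    obtain ⟨k, v⟩ := p
    rw [List.map_cons] at hnd
    rcases List.nodup_cons.mp hnd with ⟨hp, hrest⟩
    have hget : ∀ t, (PySem.Dict.mk ((k, v) :: rest)).getD t 0
        = if (k == t) = true then v else (PySem.Dict.mk rest).getD t 0 := by
      intro t
      rw [PySem.Dict.getD_eq_get?_getD, PySem.Dict.get?_mk_cons]
      split <;> simp [PySem.Dict.getD_eq_get?_getD]
    have hk0 : (PySem.Dict.mk rest).getD k 0 = 0 := by
      apply PySem.Dict.getD_of_not_contains
      simp only [PySem.Dict.contains_eq_decide_mem_keys, PySem.Dict.keys,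
        decide_eq_false_iff_not]
      intro hmem
      exact hp (by simpa using hmem)
    calc (ws.map (fun t => (PySem.Dict.mk ((k, v) :: rest)).getD t 0)).sum
        = (ws.map (fun t => if (k == t) = true then v else (PySem.Dict.mk rest).getD t 0)).sum := by
          rw [List.map_congr_left (fun t _ => hget t)]
      _ = (ws.map (fun t => (PySem.Dict.mk rest).getD t 0)).sum
            + (if ws.contains k then v - (PySem.Dict.mk rest).getD k 0 else 0) := by
          rw [sum_map_if_eq ws hw]
      _ = (((k, v) :: rest).map (fun p => if ws.contains p.1 then p.2 else 0)).sum := by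
          rw [ih hrest, hk0, List.map_cons, List.sum_cons]
          split_ifs <;> ring

lemma webTools_nodup : pvWebTools.Nodup := by decide

-- Bool-level fact behind B: a key is WebSearch/WebFetch iff it is in the tool set and
-- matches no prefix (every mcp member of the set matches a prefix; WebSearch/WebFetch match none)
lemma key_bool_fact (k : String) :
    (["WebSearch", "WebFetch"] : List String).contains k
      = (pvWebTools.contains k
          && !(pvWebPrefixes.any (fun pre => PySem.Str.startswith k pre))) := by
  by_cases hc : pvWebTools.contains k = true
  · have hmem : k ∈ pvWebTools := by simpa using hc
    simp only [pvWebTools, List.mem_cons, List.not_mem_nil, or_false] at hmem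
    rcases hmem with h|h|h|h|h|h|h|h|h|h <;> subst h <;> decide
  · have h1 : pvWebTools.contains k = false := by
      simpa using hc
    have h2 : k ∉ (["WebSearch", "WebFetch"] : List String) := by
      intro hm
      apply hc
      simp only [List.mem_cons, List.not_mem_nil, or_false] at hm
      rcases hm with h|h <;> subst h <;> decide
    rw [h1]
    simpa using h2

-- the per-key identity, purely by Boolean case analysis given key_bool_fact
lemma key_bool (c1 c2 c3 : Bool) (v : Int) (h : c3 = (c1 && !c2)) :
    (if c1 = true then v else 0) + (if c1 = true then 0 else if c2 = true then v else 0)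
      = (if c3 = true then v else 0) + (if c2 = true then v else 0) := by
  subst h
  cases c1 <;> cases c2 <;> simp

lemma per_key_eq (k : String) (v : Int) :
    (if pvWebTools.contains k then v else 0)
      + (if pvWebTools.contains k then 0
         else if pvWebPrefixes.any (fun pre => PySem.Str.startswith k pre) then v else 0)
    = (if (["WebSearch", "WebFetch"] : List String).contains k then v else 0)
      + (if pvWebPrefixes.any (fun pre => PySem.Str.startswith k pre) then v else 0) :=
  key_bool _ _ _ v (key_bool_fact k)

-- ===== VERDICT (by name: the statement is the Claim_ definition above) =====
theorem count_web_calls_py_spec : Claim_equal_count_web_calls_py := by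
  intro tc _
  unfold Spec_count_web_calls_py count_web_calls_py count_web_calls_py_alt
  set d := PySem.Dict.ofList tc with hd
  have hnd : (d.items.map Prod.fst).Nodup := by
    have := PySem.Dict.nodup_keys_ofList (κ := String) (ν := Int) tc
    simpa [PySem.Dict.keys, hd] using this
  have hmk : PySem.Dict.mk d.items = d := by cases d; rfl
  have hbodyA : (fun (count : Int) (p : String × Int) =>
      if pvWebTools.contains p.1 then count
      else if pvWebPrefixes.any (fun pre => PySem.Str.startswith p.1 pre) then count + p.2
      else count)
    = fun count p => count + (if pvWebTools.contains p.1 then 0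
        else if pvWebPrefixes.any (fun pre => PySem.Str.startswith p.1 pre) then p.2 else 0) := by
    funext count p
    split_ifs <;> simp
  have hbodyB : (fun (total : Int) (p : String × Int) =>
      if pvWebPrefixes.any (fun pre => PySem.Str.startswith p.1 pre) then total + p.2
      else total)
    = fun total p => total
        + (if pvWebPrefixes.any (fun pre => PySem.Str.startswith p.1 pre) then p.2 else 0) := by
    funext total p
    split_ifs <;> simp
  show List.foldl _ _ d.items = List.foldl _ _ d.items
  rw [hbodyA, hbodyB, PySem.List.foldl_add, PySem.List.foldl_add]
  have hA := sum_getD_eq pvWebTools webTools_nodup d.items hnd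
  rw [hmk] at hA
  have hB : d.getD "WebSearch" 0 + d.getD "WebFetch" 0
      = (d.items.map (fun p =>
          if (["WebSearch", "WebFetch"] : List String).contains p.1 then p.2 else 0)).sum := by
    have := sum_getD_eq (["WebSearch", "WebFetch"] : List String) (by decide) d.items hnd
    rw [hmk] at this
    simpa using this
  rw [hA, hB, ← PySem.List.sum_map_add_int, ← PySem.List.sum_map_add_int]
  apply congrArg
  apply List.map_congr_left
  intro p _
  exact per_key_eq p.1 p.2
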